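-- pv_equiv track=rewrite | github.com/Fastrings/AdventOfCode | Day 10/day10.py | count_reachable_summits
-- ===== SOURCE A (Python) =====
-- def is_in_bounds(x: int, y: int, m:list[list[int]]) -> bool:
--     h, w = len(m), len(m[0])
--     return x in range(h) and y in range(w)
--
-- def count_reachable_summits(topomap: list[list[int]], start_position: tuple[int, int]) -> int:
--     visited = set()
--     score = 0
--     startx, starty = start_position
--     stack = [(startx, starty, 0)]
--
--     while stack:
--         x, y, l = stack.pop()
--         if (x, y) in visited:
--             continue
--
--         visited.add((x, y))
--         if topomap[x][y] == 9 and l == 9: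
--             score += 1
--
--         for dx, dy in [(-1, 0), (0, 1), (1, 0), (0, -1)]: # UP, RIGHT, DOWN, LEFT
--             nx, ny = x + dx, y + dy
--             if is_in_bounds(nx, ny, topomap) and (nx, ny) not in visited and topomap[nx][ny] == l + 1:
--                 stack.append((nx, ny, l + 1))
--
--     return score
-- ===== SOURCE B (Python) =====
-- def count_reachable_summits(topomap, start_position):
--     h, w = len(topomap), len(topomap[0])
--     visited = set()
--     score = 0
--
--     def dfs(x, y, l):
--         nonlocal score
--         if (x, y) in visited:
--             return
--         visited.add((x, y))
--         if topomap[x][y] == 9 and l == 9: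
--             score += 1
--         for dx, dy in ((-1, 0), (0, 1), (1, 0), (0, -1)):
--             nx, ny = x + dx, y + dy
--             if 0 <= nx < h and 0 <= ny < w and (nx, ny) not in visited and topomap[nx][ny] == l + 1:
--                 dfs(nx, ny, l + 1)
--
--     startx, starty = start_position
--     dfs(startx, starty, 0)
--     return score
-- ===== Notes on version B (the rewrite author's own statement) =====
-- stated objective: alternative
-- what changed: Replaced the explicit-stack worklist loop by a recursive depth-first search: an inner dfs(x, y, l) shares one visited set and a nonlocal score, counts a cell when topomap[x][y]==9 and l==9, and recurses directly into each in-bounds unvisited neighbour of height l+1 instead of pushing it on a stack.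
-- outside the precondition, e.g. on count_reachable_summits([[1, 2], [3]], (0, 0)): A returns 0, B returns 0
import Mathlib
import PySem

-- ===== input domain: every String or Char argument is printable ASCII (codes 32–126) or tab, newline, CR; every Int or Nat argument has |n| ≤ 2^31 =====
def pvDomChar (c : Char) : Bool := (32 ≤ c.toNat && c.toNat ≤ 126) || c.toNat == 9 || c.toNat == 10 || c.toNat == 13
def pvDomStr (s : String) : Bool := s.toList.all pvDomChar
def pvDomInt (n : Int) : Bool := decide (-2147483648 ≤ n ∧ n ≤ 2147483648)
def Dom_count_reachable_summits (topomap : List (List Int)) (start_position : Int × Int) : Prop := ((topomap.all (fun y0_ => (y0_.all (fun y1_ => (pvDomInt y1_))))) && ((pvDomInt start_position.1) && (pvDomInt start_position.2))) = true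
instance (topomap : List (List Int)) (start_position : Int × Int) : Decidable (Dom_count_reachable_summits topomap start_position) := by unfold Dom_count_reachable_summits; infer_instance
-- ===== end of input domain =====

-- B replaces A's explicit-stack worklist loop by a recursive depth-first search sharing one
-- visited set and a score accumulator; objective: alternative (same cost, different decomposition).

-- ===== PORT A =====
def is_in_bounds (x : Int) (y : Int) (m : List (List Int)) : Bool :=
  let h : Int := m.length
  let w : Int := (PySem.List.pyGetD m 0 []).length
  decide (0 ≤ x ∧ x < h) && decide (0 ≤ y ∧ y < w)

-- the while-stack loop of A; fuel only makes the recursion structural (proved never exhausted)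
def crsLoop (m : List (List Int)) : Nat → PySem.Set (Int × Int) → Int → List ((Int × Int) × Int) → Int
  | _, _, score, [] => score
  | 0, _, score, _ :: _ => score
  | fuel+1, visited, score, (p, l) :: rest =>
      if PySem.Set.contains visited p then
        crsLoop m fuel visited score rest
      else
        let visited' := PySem.Set.add visited p
        let score' := if PySem.List.pyGetD (PySem.List.pyGetD m p.1 []) p.2 0 == 9 && l == 9 then score + 1 else score
        let stack' := [((-1:Int),(0:Int)),(0,1),(1,0),(0,-1)].foldl (fun st d =>
            if is_in_bounds (p.1+d.1) (p.2+d.2) m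
               && !(PySem.Set.contains visited' (p.1+d.1, p.2+d.2))
               && (PySem.List.pyGetD (PySem.List.pyGetD m (p.1+d.1) []) (p.2+d.2) 0 == l + 1)
            then ((p.1+d.1, p.2+d.2), l + 1) :: st else st) rest
        crsLoop m fuel visited' score' stack'

def count_reachable_summits (topomap : List (List Int)) (start_position : Int × Int) : Int :=
  crsLoop topomap (4 * topomap.length * (PySem.List.pyGetD topomap 0 []).length + 9)
    PySem.Set.empty 0 [(start_position, 0)]

-- ===== PORT B =====
-- the recursive dfs closure of B; fuel only makes the recursion structural (proved never exhausted)
def dfsB (m : List (List Int)) (h w : Int) : Nat → Int → Int → Int → (PySem.Set (Int × Int) × Int) → (PySem.Set (Int × Int) × Int)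
  | 0, _, _, _, st => st
  | fuel+1, x, y, l, (visited, score) =>
      if PySem.Set.contains visited (x, y) then (visited, score)
      else
        let visited := PySem.Set.add visited (x, y)
        let score := if PySem.List.pyGetD (PySem.List.pyGetD m x []) y 0 == 9 && l == 9 then score + 1 else score
        [((-1:Int),(0:Int)),(0,1),(1,0),(0,-1)].foldl (fun st d =>
            if decide (0 ≤ x+d.1 ∧ x+d.1 < h) && decide (0 ≤ y+d.2 ∧ y+d.2 < w)
               && !(PySem.Set.contains st.1 (x+d.1, y+d.2))
               && (PySem.List.pyGetD (PySem.List.pyGetD m (x+d.1) []) (y+d.2) 0 == l + 1)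
            then dfsB m h w fuel (x+d.1) (y+d.2) (l+1) st else st) (visited, score)

def count_reachable_summits_alt (topomap : List (List Int)) (start_position : Int × Int) : Int :=
  let h : Int := topomap.length
  let w : Int := (PySem.List.pyGetD topomap 0 []).length
  (dfsB topomap h w (topomap.length * (PySem.List.pyGetD topomap 0 []).length + 2)
    start_position.1 start_position.2 0 (PySem.Set.empty, 0)).2

-- ===== PRECONDITION & SPEC =====
-- Pre_ excludes inputs on which A raises IndexError: an empty map, an empty first row,
-- a start position outside Python's index range, and (slightly narrower than the exact
-- raise set) ragged maps, on a few of which A happens to return before reaching a short row.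
def Pre_count_reachable_summits (topomap : List (List Int)) (start_position : Int × Int) : Prop :=
  topomap ≠ [] ∧
  (∀ row ∈ topomap, row.length = (PySem.List.pyGetD topomap 0 []).length) ∧
  0 < (PySem.List.pyGetD topomap 0 []).length ∧
  -(topomap.length : Int) ≤ start_position.1 ∧ start_position.1 < topomap.length ∧
  -((PySem.List.pyGetD topomap 0 []).length : Int) ≤ start_position.2 ∧
  start_position.2 < ((PySem.List.pyGetD topomap 0 []).length : Int)
instance (topomap : List (List Int)) (start_position : Int × Int) : Decidable (Pre_count_reachable_summits topomap start_position) := by unfold Pre_count_reachable_summits; infer_instance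

def pvWitness_count_reachable_summits : List (List Int) × (Int × Int) := ([[0, 1], [9, 2]], (0, 0))

def Spec_count_reachable_summits (topomap : List (List Int)) (start_position : Int × Int) (out : Int) : Prop := out = count_reachable_summits_alt topomap start_position
instance (topomap : List (List Int)) (start_position : Int × Int) (out : Int) : Decidable (Spec_count_reachable_summits topomap start_position out) := by unfold Spec_count_reachable_summits; infer_instance

-- ===== CLAIM (what is proved, stated in full; the proofs are below) =====
def Claim_equal_count_reachable_summits : Prop := ∀ (topomap : List (List Int)) (start_position : Int × Int), Dom_count_reachable_summits topomap start_position → Pre_count_reachable_summits topomap start_position → Spec_count_reachable_summits topomap start_position (count_reachable_summits topomap start_position)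

-- ===== LEMMAS AND PROOFS =====

-- proof-side vocabulary
def pvCell (m : List (List Int)) (p : Int × Int) : Int :=
  PySem.List.pyGetD (PySem.List.pyGetD m p.1 []) p.2 0
def pvLvl (m : List (List Int)) (s p : Int × Int) : Int := if p = s then 0 else pvCell m p
def pvOffs : List (Int × Int) := [(-1,0),(0,1),(1,0),(0,-1)]
def pvEdge (m : List (List Int)) (s p q : Int × Int) : Prop :=
  (∃ d ∈ pvOffs, q = (p.1+d.1, p.2+d.2)) ∧ is_in_bounds q.1 q.2 m = true ∧ pvCell m q = pvLvl m s p + 1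
inductive pvReach (m : List (List Int)) (s : Int × Int) : (Int × Int) → Prop
  | base : pvReach m s s
  | step {p q : Int × Int} : pvReach m s p → pvEdge m s p q → pvReach m s q
def pvCondB (m : List (List Int)) (s p : Int × Int) : Bool := pvCell m p == 9 && pvLvl m s p == 9
def pvAllowed (m : List (List Int)) (s : Int × Int) : Finset (Int × Int) :=
  insert s (((Finset.range m.length) ×ˢ (Finset.range (PySem.List.pyGetD m 0 []).length)).image
    (fun ab => ((ab.1 : Int), (ab.2 : Int))))



lemma pv_inb_mem_allowed (m : List (List Int)) (s : Int × Int) (x y : Int)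
    (h : is_in_bounds x y m = true) : (x, y) ∈ pvAllowed m s := by
  simp only [is_in_bounds, Bool.and_eq_true, decide_eq_true_eq] at h
  obtain ⟨⟨hx0, hxh⟩, hy0, hyw⟩ := h
  apply Finset.mem_insert_of_mem
  simp only [Finset.mem_image, Finset.mem_product, Finset.mem_range]
  exact ⟨(x.toNat, y.toNat), ⟨by omega, by omega⟩, by simp [Int.toNat_of_nonneg hx0, Int.toNat_of_nonneg hy0]⟩

lemma pv_allowed_card (m : List (List Int)) (s : Int × Int) :
    (pvAllowed m s).card ≤ m.length * (PySem.List.pyGetD m 0 []).length + 1 := by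
  calc (pvAllowed m s).card ≤ _ + 1 := Finset.card_insert_le _ _
    _ ≤ _ := by
      gcongr
      calc _ ≤ ((Finset.range m.length) ×ˢ (Finset.range (PySem.List.pyGetD m 0 []).length)).card := Finset.card_image_le
        _ = _ := by simp [Finset.card_product]

lemma pv_mem_foldl_consIf {D E : Type} (f : D → Bool) (g : D → E) (ds : List D) :
    ∀ (init : List E) (e : E), e ∈ ds.foldl (fun st d => if f d then g d :: st else st) init ↔
      e ∈ init ∨ ∃ d ∈ ds, f d = true ∧ e = g d := by
  induction ds with
  | nil => simp
  | cons d ds ih =>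
    intro init e
    simp only [List.foldl_cons, ih, List.mem_cons]
    by_cases hf : f d = true <;> simp [hf] <;> aesop

lemma pv_length_foldl_consIf {D E : Type} (f : D → Bool) (g : D → E) (ds : List D) :
    ∀ init : List E, (ds.foldl (fun st d => if f d then g d :: st else st) init).length ≤
      init.length + ds.length := by
  induction ds with
  | nil => simp
  | cons d ds ih =>
    intro init
    simp only [List.foldl_cons, List.length_cons]
    by_cases hf : f d = true <;> simp only [hf, if_true, if_false, Bool.false_eq_true] <;>
      calc _ ≤ _ := ih _
        _ ≤ _ := by simp <;> omega

lemma pv_visited_complete (m : List (List Int)) (s : Int × Int) (visited : List (Int × Int))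
    (hs : s ∈ visited)
    (hC : ∀ p ∈ visited, ∀ q, pvEdge m s p q → q ∈ visited) :
    ∀ p, pvReach m s p → p ∈ visited := by
  intro p hp
  induction hp with
  | base => exact hs
  | step hr he ih => exact hC _ ih _ he


lemma pv_loop_final (m : List (List Int)) (s : Int × Int) (fuel : Nat)
    (visited : List (Int × Int)) (score : Int)
    (hnd : visited.Nodup)
    (hV : ∀ p ∈ visited, p ∈ pvAllowed m s ∧ pvReach m s p)
    (hC : ∀ p ∈ visited, ∀ q, pvEdge m s p q → q ∈ visited)
    (hs : s ∈ visited)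
    (hscore : score = ((visited.filter (pvCondB m s)).length : Int)) :
    ∃ V : List (Int × Int), V.Nodup ∧ (∀ p, p ∈ V ↔ pvReach m s p) ∧
      crsLoop m fuel visited score [] = ((V.filter (pvCondB m s)).length : Int) := by
  refine ⟨visited, hnd, fun p => ⟨fun hp => (hV p hp).2, pv_visited_complete m s visited hs hC p⟩, ?_⟩
  cases fuel <;> simpa [crsLoop] using hscore
lemma crsLoop_spec (m : List (List Int)) (s : Int × Int) :
    ∀ (fuel : Nat) (visited : List (Int × Int)) (score : Int) (stack : List ((Int × Int) × Int)),
    visited.Nodup →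
    (∀ e ∈ stack, e.2 = pvLvl m s e.1 ∧ e.1 ∈ pvAllowed m s ∧ pvReach m s e.1) →
    (∀ p ∈ visited, p ∈ pvAllowed m s ∧ pvReach m s p) →
    (∀ p ∈ visited, ∀ q, pvEdge m s p q → q ∈ visited ∨ ∃ l, (q, l) ∈ stack) →
    (s ∈ visited ∨ (visited = [] ∧ stack = [(s, 0)])) →
    score = ((visited.filter (pvCondB m s)).length : Int) →
    4 * ((pvAllowed m s \ visited.toFinset).card) + stack.length ≤ fuel →
    ∃ V : List (Int × Int), V.Nodup ∧ (∀ p, p ∈ V ↔ pvReach m s p) ∧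
      crsLoop m fuel visited score stack = ((V.filter (pvCondB m s)).length : Int) := by
  intro fuel
  induction fuel with
  | zero =>
    intro visited score stack hnd hA hV hC hS0 hscore hfuel
    have hstack : stack = [] := by
      have := List.length_eq_zero_iff.mp (by omega : stack.length = 0); exact this
    subst hstack
    have hs : s ∈ visited := by
      rcases hS0 with h | ⟨_, h⟩
      · exact h
      · exact absurd h (by simp)
    exact pv_loop_final m s 0 visited score hnd hV
      (fun p hp q he => by
        rcases hC p hp q he with h | ⟨l, hl⟩
        · exact h
        · exact absurd hl (by simp)) hs hscore
  | succ fuel ih =>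
    intro visited score stack hnd hA hV hC hS0 hscore hfuel
    match stack with
    | [] =>
      have hs : s ∈ visited := by
        rcases hS0 with h | ⟨_, h⟩
        · exact h
        · exact absurd h (by simp)
      exact pv_loop_final m s (fuel+1) visited score hnd hV
        (fun p hp q he => by
          rcases hC p hp q he with h | ⟨l, hl⟩
          · exact h
          · exact absurd hl (by simp)) hs hscore
    | (p, l) :: rest =>
      rw [crsLoop]
      by_cases hpv : p ∈ visited
      · rw [if_pos (by simpa [PySem.Set.contains_iff] using hpv)]
        refine ih visited score rest hnd (fun e he => hA e (List.mem_cons_of_mem _ he)) hV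
          (fun p' hp' q he => ?_) (Or.inl ?_) hscore (by simp at hfuel ⊢; omega)
        · rcases hC p' hp' q he with h | ⟨l0, hl0⟩
          · exact Or.inl h
          · rcases List.mem_cons.mp hl0 with h | h
            · exact Or.inl (by cases h; exact hpv)
            · exact Or.inr ⟨l0, h⟩
        · rcases hS0 with h | ⟨h, _⟩
          · exact h
          · exact absurd hpv (by simp [h])
      · rw [if_neg (by simpa [PySem.Set.contains_iff] using hpv)]
        simp only []
        rw [PySem.Set.add_of_not_mem hpv]
        obtain ⟨hlp, hpA, hpR⟩ := hA (p, l) List.mem_cons_self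
        have hlp' : l = pvLvl m s p := hlp
        have hsv' : s ∈ visited ++ [p] := by
          rcases hS0 with h | ⟨hve, hse⟩
          · exact List.mem_append_left _ h
          · have : p = s := by
              have := List.cons_eq_cons.mp hse
              exact congrArg Prod.fst this.1
            simp [this]
        -- membership of the pushed stack
        have hmem := pv_mem_foldl_consIf
          (fun d : Int × Int => is_in_bounds (p.1+d.1) (p.2+d.2) m
               && !(PySem.Set.contains (visited ++ [p]) (p.1+d.1, p.2+d.2))
               && (PySem.List.pyGetD (PySem.List.pyGetD m (p.1+d.1) []) (p.2+d.2) 0 == l + 1))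
          (fun d : Int × Int => ((p.1+d.1, p.2+d.2), l + 1))
          [((-1:Int),(0:Int)),(0,1),(1,0),(0,-1)] rest
        have hcond : ∀ d : Int × Int,
            (is_in_bounds (p.1+d.1) (p.2+d.2) m
               && !(PySem.Set.contains (visited ++ [p]) (p.1+d.1, p.2+d.2))
               && (PySem.List.pyGetD (PySem.List.pyGetD m (p.1+d.1) []) (p.2+d.2) 0 == l + 1)) = true ↔
            (is_in_bounds (p.1+d.1) (p.2+d.2) m = true ∧ (p.1+d.1, p.2+d.2) ∉ visited ++ [p] ∧
             pvCell m (p.1+d.1, p.2+d.2) = l + 1) := by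
          intro d
          simp [pvCell, and_assoc]
        refine ih (visited ++ [p]) _ _ ?_ ?_ ?_ ?_ (Or.inl hsv') ?_ ?_
        · simp only [List.nodup_append, List.nodup_singleton, true_and]
          refine ⟨hnd, ?_⟩
          simp only [List.mem_singleton]
          exact fun a ha b hb hab => hpv ((hab ▸ hb) ▸ ha)
        · -- hA for new stack
          intro e he
          rcases (hmem e).mp he with h | ⟨d, hd, hf, he2⟩
          · exact hA e (List.mem_cons_of_mem _ h)
          · obtain ⟨hinb, hnv, hcell⟩ := (hcond d).mp hf
            subst he2
            have hqs : (p.1+d.1, p.2+d.2) ≠ s := fun h => hnv (h ▸ hsv')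
            have hlq : pvLvl m s (p.1+d.1, p.2+d.2) = l + 1 := by
              rw [pvLvl, if_neg hqs, hcell]
            refine ⟨hlq.symm, pv_inb_mem_allowed m s _ _ hinb, ?_⟩
            exact pvReach.step hpR ⟨⟨d, hd, rfl⟩, hinb, by rw [hcell, hlp']⟩
        · -- hV
          intro p' hp'
          rcases List.mem_append.mp hp' with h | h
          · exact hV p' h
          · simp at h; subst h; exact ⟨hpA, hpR⟩
        · -- closure
          intro p' hp' q he
          rcases List.mem_append.mp hp' with h | h
          · rcases hC p' h q he with hq | ⟨l0, hl0⟩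
            · exact Or.inl (List.mem_append_left _ hq)
            · rcases List.mem_cons.mp hl0 with heq | hin
              · refine Or.inl (List.mem_append_right _ ?_)
                cases heq; simp
              · exact Or.inr ⟨l0, (hmem _).mpr (Or.inl hin)⟩
          · simp only [List.mem_singleton] at h
            rw [h] at he
            by_cases hqv : q ∈ visited ++ [p]
            · exact Or.inl hqv
            · obtain ⟨⟨d, hd, hqd⟩, hinb, hcell⟩ := he
              subst hqd
              refine Or.inr ⟨l + 1, (hmem _).mpr (Or.inr ⟨d, hd, ?_, rfl⟩)⟩
              refine (hcond d).mpr ⟨hinb, hqv, ?_⟩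
              rw [hcell, ← hlp']
        · -- score
          have hsplit : (visited ++ [p]).filter (pvCondB m s) =
              visited.filter (pvCondB m s) ++ [p].filter (pvCondB m s) := List.filter_append _ _
          have hbeq : (PySem.List.pyGetD (PySem.List.pyGetD m p.1 []) p.2 0 == 9 && l == 9) = pvCondB m s p := by
            rw [pvCondB, ← hlp', pvCell]
          rw [hbeq, hsplit, List.length_append, hscore]
          by_cases hcp : pvCondB m s p = true
          · simp [hcp]
          · simp [Bool.not_eq_true] at hcp; simp [hcp]
        · -- fuel
          have hlen := pv_length_foldl_consIf
            (fun d : Int × Int => is_in_bounds (p.1+d.1) (p.2+d.2) m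
               && !(PySem.Set.contains (visited ++ [p]) (p.1+d.1, p.2+d.2))
               && (PySem.List.pyGetD (PySem.List.pyGetD m (p.1+d.1) []) (p.2+d.2) 0 == l + 1))
            (fun d : Int × Int => ((p.1+d.1, p.2+d.2), l + 1))
            [((-1:Int),(0:Int)),(0,1),(1,0),(0,-1)] rest
          have htf : (visited ++ [p]).toFinset = insert p visited.toFinset := by
            ext; simp
          have hpmem : p ∈ pvAllowed m s \ visited.toFinset := by
            simp [Finset.mem_sdiff, hpA, hpv]
          have hcard : (pvAllowed m s \ (visited ++ [p]).toFinset).card =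
              (pvAllowed m s \ visited.toFinset).card - 1 := by
            rw [htf, Finset.sdiff_insert, Finset.card_erase_of_mem hpmem]
          have hcpos : 1 ≤ (pvAllowed m s \ visited.toFinset).card := Finset.card_pos.mpr ⟨p, hpmem⟩ 
          simp only [List.length_cons, List.length_nil] at hlen hfuel
          rw [hcard]
          omega
lemma dfsB_post (m : List (List Int)) (s : Int × Int) :
    ∀ (fuel : Nat) (x y l : Int) (vis : List (Int × Int)) (sc : Int),
    vis.Nodup →
    (∀ p ∈ vis, p ∈ pvAllowed m s ∧ pvReach m s p) →
    l = pvLvl m s (x, y) → (x, y) ∈ pvAllowed m s → pvReach m s (x, y) →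
    (s ∈ vis ∨ (x, y) = s) →
    sc = ((vis.filter (pvCondB m s)).length : Int) →
    (pvAllowed m s \ vis.toFinset).card + 1 ≤ fuel →
    ∃ vis' : List (Int × Int),
      dfsB m (m.length : Int) ((PySem.List.pyGetD m 0 []).length : Int) fuel x y l (vis, sc)
        = (vis', ((vis'.filter (pvCondB m s)).length : Int)) ∧
      vis'.Nodup ∧ (∀ p ∈ vis, p ∈ vis') ∧ (x, y) ∈ vis' ∧ s ∈ vis' ∧
      (∀ p ∈ vis', p ∈ pvAllowed m s ∧ pvReach m s p) ∧
      (∀ p ∈ vis', p ∈ vis ∨ ∀ q, pvEdge m s p q → q ∈ vis') := by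
  intro fuel
  induction fuel with
  | zero =>
    intro x y l vis sc _ _ _ _ _ _ _ hfuel
    omega
  | succ fuel ih =>
    intro x y l vis sc hnd hV hl hxA hxR hsv hsc hfuel
    rw [dfsB]
    by_cases hv : (x, y) ∈ vis
    · rw [if_pos (by simpa [PySem.Set.contains_iff] using hv)]
      have hs : s ∈ vis := by
        rcases hsv with h | h
        · exact h
        · exact h ▸ hv
      exact ⟨vis, by rw [hsc], hnd, fun p hp => hp, hv, hs, hV, fun p _ => Or.inl ‹p ∈ vis›⟩
    · rw [if_neg (by simpa [PySem.Set.contains_iff] using hv)]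
      simp only []
      rw [PySem.Set.add_of_not_mem hv]
      have hxy : s ∈ vis ++ [(x, y)] := by
        rcases hsv with h | h
        · exact List.mem_append_left _ h
        · simp [h]
      have hnd0 : (vis ++ [(x, y)]).Nodup := by
        simp only [List.nodup_append, List.nodup_singleton, true_and]
        refine ⟨hnd, ?_⟩
        simp only [List.mem_singleton]
        exact fun a ha b hb hab => hv ((hab ▸ hb) ▸ ha)
      have hV0 : ∀ p ∈ vis ++ [(x, y)], p ∈ pvAllowed m s ∧ pvReach m s p := by
        intro p hp
        rcases List.mem_append.mp hp with h | h
        · exact hV p h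
        · simp at h; subst h; exact ⟨hxA, hxR⟩
      have hsc0 : (if PySem.List.pyGetD (PySem.List.pyGetD m x []) y 0 == 9 && l == 9 then sc + 1 else sc)
          = (((vis ++ [(x, y)]).filter (pvCondB m s)).length : Int) := by
        have hbeq : (PySem.List.pyGetD (PySem.List.pyGetD m x []) y 0 == 9 && l == 9) = pvCondB m s (x, y) := by
          rw [pvCondB, ← hl, pvCell]
        rw [hbeq, List.filter_append, List.length_append, hsc]
        by_cases hcp : pvCondB m s (x, y) = true
        · simp [hcp]
        · simp only [Bool.not_eq_true] at hcp; simp [hcp]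
      have hxyA : (x, y) ∈ pvAllowed m s \ vis.toFinset := by
        simp [Finset.mem_sdiff, hxA, hv]
      have hcard0 : (pvAllowed m s \ (vis ++ [(x, y)]).toFinset).card
          = (pvAllowed m s \ vis.toFinset).card - 1 := by
        have htf : (vis ++ [(x, y)]).toFinset = insert (x, y) vis.toFinset := by
          ext; simp [or_comm]
        rw [htf, Finset.sdiff_insert, Finset.card_erase_of_mem hxyA]
      have hcpos : 1 ≤ (pvAllowed m s \ vis.toFinset).card := Finset.card_pos.mpr ⟨_, hxyA⟩
      -- inner induction over the neighbour list
      have inner : ∀ ds : List (Int × Int), (∀ d ∈ ds, d ∈ pvOffs) →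
          ∀ (vis1 : List (Int × Int)) (sc1 : Int),
          vis1.Nodup →
          (∀ p ∈ vis1, p ∈ pvAllowed m s ∧ pvReach m s p) →
          (∀ p ∈ vis ++ [(x, y)], p ∈ vis1) →
          s ∈ vis1 →
          sc1 = ((vis1.filter (pvCondB m s)).length : Int) →
          (∀ p ∈ vis1, p ∈ vis ++ [(x, y)] ∨ ∀ q, pvEdge m s p q → q ∈ vis1) →
          (pvAllowed m s \ vis1.toFinset).card + 1 ≤ fuel + 1 →
          ∃ vis2 : List (Int × Int),
            ds.foldl (fun st d =>
              if decide (0 ≤ x+d.1 ∧ x+d.1 < (m.length : Int)) && decide (0 ≤ y+d.2 ∧ y+d.2 < ((PySem.List.pyGetD m 0 []).length : Int))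
                 && !(PySem.Set.contains st.1 (x+d.1, y+d.2))
                 && (PySem.List.pyGetD (PySem.List.pyGetD m (x+d.1) []) (y+d.2) 0 == l + 1)
              then dfsB m (m.length : Int) ((PySem.List.pyGetD m 0 []).length : Int) fuel (x+d.1) (y+d.2) (l+1) st else st)
              (vis1, sc1)
            = (vis2, ((vis2.filter (pvCondB m s)).length : Int)) ∧
            vis2.Nodup ∧ (∀ p ∈ vis1, p ∈ vis2) ∧ s ∈ vis2 ∧
            (∀ p ∈ vis2, p ∈ pvAllowed m s ∧ pvReach m s p) ∧
            (∀ p ∈ vis2, p ∈ vis ++ [(x, y)] ∨ ∀ q, pvEdge m s p q → q ∈ vis2) ∧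
            (∀ d ∈ ds, (is_in_bounds (x+d.1) (y+d.2) m = true ∧ pvCell m (x+d.1, y+d.2) = l + 1) →
              (x+d.1, y+d.2) ∈ vis2) := by
        intro ds
        induction ds with
        | nil =>
          intro _ vis1 sc1 h1 h2 h3 h4 h5 h6 _
          exact ⟨vis1, by simp only [List.foldl_nil, h5], h1, fun p hp => hp, h4, h2, h6, by simp⟩
        | cons d ds' ihds =>
          intro hds vis1 sc1 h1 h2 h3 h4 h5 h6 h7
          simp only [List.foldl_cons]
          by_cases hg : (decide (0 ≤ x+d.1 ∧ x+d.1 < (m.length : Int)) && decide (0 ≤ y+d.2 ∧ y+d.2 < ((PySem.List.pyGetD m 0 []).length : Int))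
               && !(PySem.Set.contains vis1 (x+d.1, y+d.2))
               && (PySem.List.pyGetD (PySem.List.pyGetD m (x+d.1) []) (y+d.2) 0 == l + 1)) = true
          · rw [if_pos hg]
            simp only [Bool.and_eq_true, decide_eq_true_eq, beq_iff_eq, Bool.not_eq_eq_eq_not,
              Bool.not_true, PySem.Set.contains_eq_listContains, List.contains_eq_mem,
              decide_eq_false_iff_not] at hg
            obtain ⟨⟨⟨hb1, hb2⟩, hnv1⟩, hcell1⟩ := hg
            have hinb : is_in_bounds (x+d.1) (y+d.2) m = true := by
              simp only [is_in_bounds, Bool.and_eq_true, decide_eq_true_eq]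
              exact ⟨hb1, hb2⟩
            have hqs : (x+d.1, y+d.2) ≠ s := fun h => hnv1 (h ▸ h4)
            have hedge : pvEdge m s (x, y) (x+d.1, y+d.2) :=
              ⟨⟨d, hds d List.mem_cons_self, rfl⟩, hinb, by rw [pvCell]; rw [hcell1, hl]⟩
            have hlq : l + 1 = pvLvl m s (x+d.1, y+d.2) := by
              rw [pvLvl, if_neg hqs, pvCell]; exact hcell1.symm
            have hcard1 : (pvAllowed m s \ vis1.toFinset).card + 1 ≤ fuel := by
              have hsub : (vis ++ [(x, y)]).toFinset ⊆ vis1.toFinset := by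
                intro a ha
                rw [List.mem_toFinset] at ha ⊢
                exact h3 a ha
              have hmono : (pvAllowed m s \ vis1.toFinset).card ≤
                  (pvAllowed m s \ (vis ++ [(x, y)]).toFinset).card :=
                Finset.card_le_card (Finset.sdiff_subset_sdiff (Finset.Subset.refl _) hsub)
              omega
            obtain ⟨visC, heqC, hndC, hmonC, hxC, hsC, hVC, hclC⟩ :=
              ih (x+d.1) (y+d.2) (l+1) vis1 sc1 h1 h2 hlq
                (pv_inb_mem_allowed m s _ _ hinb) (pvReach.step hxR hedge) (Or.inl h4) h5 hcard1
            rw [heqC]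
            have hclC' : ∀ p ∈ visC, p ∈ vis ++ [(x, y)] ∨ ∀ q, pvEdge m s p q → q ∈ visC := by
              intro p hp
              rcases hclC p hp with h | h
              · rcases h6 p h with h' | h'
                · exact Or.inl h'
                · exact Or.inr (fun q hq => hmonC q (h' q hq))
              · exact Or.inr h
            obtain ⟨vis2, heq2, hnd2, hmon2, hs2, hV2, hcl2, hq2⟩ :=
              ihds (fun d' hd' => hds d' (List.mem_cons_of_mem _ hd')) visC _ hndC hVC
                (fun p hp => hmonC p (h3 p hp)) hsC rfl hclC'
                (by
                  have hsub : vis1.toFinset ⊆ visC.toFinset := by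
                    intro a ha
                    rw [List.mem_toFinset] at ha ⊢
                    exact hmonC a ha
                  have := Finset.card_le_card (Finset.sdiff_subset_sdiff (Finset.Subset.refl (pvAllowed m s)) hsub)
                  omega)
            refine ⟨vis2, heq2, hnd2, fun p hp => hmon2 p (hmonC p hp), hs2, hV2, hcl2, ?_⟩
            intro d' hd' hcd'
            rcases List.mem_cons.mp hd' with h | h
            · subst h; exact hmon2 _ hxC
            · exact hq2 d' h hcd'
          · rw [if_neg hg]
            obtain ⟨vis2, heq2, hnd2, hmon2, hs2, hV2, hcl2, hq2⟩ :=
              ihds (fun d' hd' => hds d' (List.mem_cons_of_mem _ hd')) vis1 sc1 h1 h2 h3 h4 h5 h6 h7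
            refine ⟨vis2, heq2, hnd2, hmon2, hs2, hV2, hcl2, ?_⟩
            intro d' hd' hcd'
            rcases List.mem_cons.mp hd' with h | h
            · subst h
              obtain ⟨hinb', hcell'⟩ := hcd'
              simp only [is_in_bounds, Bool.and_eq_true, decide_eq_true_eq] at hinb'
              rw [pvCell] at hcell'
              have hmem1 : (x+d'.1, y+d'.2) ∈ vis1 := by
                by_contra hcon
                apply hg
                simp only [Bool.and_eq_true, decide_eq_true_eq, beq_iff_eq, Bool.not_eq_eq_eq_not,
                  Bool.not_true, PySem.Set.contains_eq_listContains, List.contains_eq_mem,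
                  decide_eq_false_iff_not]
                exact ⟨⟨⟨hinb'.1, hinb'.2⟩, hcon⟩, hcell'⟩
              exact hmon2 _ hmem1
            · exact hq2 d' h hcd'
      obtain ⟨vis2, heq2, hnd2, hmon2, hs2, hV2, hcl2, hq2⟩ :=
        inner [((-1:Int),(0:Int)),(0,1),(1,0),(0,-1)] (fun d hd => hd)
          (vis ++ [(x, y)]) _ hnd0 hV0 (fun p hp => hp) hxy hsc0
          (fun p hp => Or.inl hp) (by omega)
      refine ⟨vis2, heq2, hnd2, fun p hp => hmon2 p (List.mem_append_left _ hp),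
        hmon2 _ (List.mem_append_right _ List.mem_cons_self), hs2, hV2, ?_⟩
      intro p hp
      rcases hcl2 p hp with h | h
      · rcases List.mem_append.mp h with h' | h'
        · exact Or.inl h'
        · simp only [List.mem_singleton] at h'
          subst h'
          refine Or.inr (fun q hq => ?_)
          obtain ⟨⟨d, hd, hqd⟩, hinb, hcell⟩ := hq
          rw [pvOffs] at hd
          subst hqd
          exact hq2 d hd ⟨hinb, by rw [show pvCell m (x+d.1, y+d.2) = pvLvl m s (x, y) + 1 from hcell, ← hl]⟩
      · exact Or.inr h
lemma pv_count_eq (m : List (List Int)) (s : Int × Int) (V W : List (Int × Int))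
    (hVnd : V.Nodup) (hWnd : W.Nodup) (hmem : ∀ p, p ∈ V ↔ p ∈ W) :
    (((V.filter (pvCondB m s)).length : Int)) = (((W.filter (pvCondB m s)).length : Int)) := by
  congr 1
  apply List.Perm.length_eq
  rw [List.perm_ext_iff_of_nodup (List.Nodup.filter _ hVnd) (List.Nodup.filter _ hWnd)]
  intro q
  rw [List.mem_filter, List.mem_filter, hmem q]


-- ===== VERDICT (by name: the statement is the Claim_ definition above) =====
theorem count_reachable_summits_spec : Claim_equal_count_reachable_summits := by
  intro m s _hdom _hpre
  show count_reachable_summits m s = count_reachable_summits_alt m s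
  -- A side: the stack loop returns the summit count of the reachable set
  obtain ⟨V, hVnd, hVmem, hval⟩ := crsLoop_spec m s
    (4 * m.length * (PySem.List.pyGetD m 0 []).length + 9) [] 0 [(s, 0)]
    List.nodup_nil
    (by
      intro e he
      simp only [List.mem_singleton] at he
      subst he
      exact ⟨by simp [pvLvl], Finset.mem_insert_self _ _, pvReach.base⟩)
    (by simp)
    (by simp)
    (Or.inr ⟨rfl, rfl⟩)
    (by simp)
    (by
      have hc := pv_allowed_card m s
      simp only [List.toFinset_nil, Finset.sdiff_empty, List.length_cons, List.length_nil]
      rw [Nat.mul_assoc]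
      omega)
  -- B side: the recursive dfs returns the summit count of the reachable set
  obtain ⟨W, heqW, hWnd, _, hxW, hsW, hWV, hWcl⟩ := dfsB_post m s
    (m.length * (PySem.List.pyGetD m 0 []).length + 2) s.1 s.2 0 [] 0
    List.nodup_nil
    (by simp)
    (by simp [pvLvl])
    (Finset.mem_insert_self _ _)
    pvReach.base
    (Or.inr rfl)
    (by simp)
    (by
      have hc := pv_allowed_card m s
      simp only [List.toFinset_nil, Finset.sdiff_empty]
      omega)
  have hWmem : ∀ p, p ∈ W ↔ pvReach m s p := by
    intro p
    refine ⟨fun hp => (hWV p hp).2, ?_⟩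
    refine pv_visited_complete m s W hsW (fun p' hp' q hq => ?_) p
    rcases hWcl p' hp' with h | h
    · exact absurd h (by simp)
    · exact h q hq
  rw [count_reachable_summits,
    show (PySem.Set.empty : PySem.Set (Int × Int)) = ([] : List (Int × Int)) from rfl,
    hval, count_reachable_summits_alt]
  rw [show (PySem.Set.empty : PySem.Set (Int × Int)) = ([] : List (Int × Int)) from rfl, heqW]
  exact pv_count_eq m s V W hVnd hWnd (fun p => (hVmem p).trans (hWmem p).symm)
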